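-- pv_equiv track=rewrite | github.com/rekkerz/m_audio | python/app/app.py | seq_to_text
-- ===== SOURCE A (Python) =====
-- def seq_to_text(sequence):
--     tuning = ["E", "B", "G", "D", "A", "e"]
--     tab_lists = {"E": [],
--                  "B": [],
--                  "G": [],
--                  "D": [],
--                  "A": [],
--                  "e": []}
--
--     for i in sequence:
--         string = tuning[i[0]-1]
--         filler = "-" * len(str(i[1])) # get the length of "-" to match chars
--         for key in tab_lists.keys():
--             if key == string:
--                 tab_lists[key].append(str(i[1]))
--             else:
--                 tab_lists[key].append(filler)
--             tab_lists[key].append("-")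
--
--     return "e| " + str("".join(tab_lists["e"])) + "\n" \
--            + "B| " + str("".join(tab_lists["B"])) + "\n" \
--            + "G| " + str("".join(tab_lists["G"])) + "\n" \
--            + "D| " + str("".join(tab_lists["D"])) + "\n" \
--            + "A| " + str("".join(tab_lists["A"])) + "\n" \
--            + "E| " + str("".join(tab_lists["E"]))
-- ===== SOURCE B (Python) =====
-- def seq_to_text(sequence):
--     tuning = ["E", "B", "G", "D", "A", "e"]
--     events = [(tuning[i[0] - 1], str(i[1])) for i in sequence]
--
--     def line(name):
--         return name + "| " + "".join(
--             num + "-" if name == nm else "-" * len(num) + "-"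
--             for nm, num in events)
--
--     return "\n".join(line(name) for name in ["e", "B", "G", "D", "A", "E"])
-- ===== Notes on version B (the rewrite author's own statement) =====
-- stated objective: simpler
-- what changed: Replaces the dict of six mutable parallel lists updated per event with a one-pass precomputation of (string-name, digits) events followed by six independent line builds joined with newline.
import Mathlib
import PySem

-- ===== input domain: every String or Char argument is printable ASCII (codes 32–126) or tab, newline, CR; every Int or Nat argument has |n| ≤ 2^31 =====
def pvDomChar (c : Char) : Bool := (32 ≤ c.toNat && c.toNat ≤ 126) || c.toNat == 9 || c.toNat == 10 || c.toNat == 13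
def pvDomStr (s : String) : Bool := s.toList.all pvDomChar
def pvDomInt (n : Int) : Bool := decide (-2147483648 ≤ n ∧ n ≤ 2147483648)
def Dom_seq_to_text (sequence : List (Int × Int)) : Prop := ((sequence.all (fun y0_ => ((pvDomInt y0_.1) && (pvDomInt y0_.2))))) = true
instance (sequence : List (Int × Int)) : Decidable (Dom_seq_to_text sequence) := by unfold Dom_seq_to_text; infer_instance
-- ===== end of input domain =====

-- B replaces A's dict of six mutable parallel lists with a precomputed event list and six independent line builds (objective: simpler).

-- ===== PORT A =====
-- the dict literal with six fixed keys is ported as a six-field record; dict key iteration order is the insertion order E,B,G,D,A,e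
structure TabState where
  E : List String
  B : List String
  G : List String
  D : List String
  A : List String
  e : List String
deriving Repr, DecidableEq

def seqStepA (t : TabState) (i : Int × Int) : TabState :=
  let string := (PySem.List.pyGet? ["E", "B", "G", "D", "A", "e"] (i.1 - 1)).getD ""  -- getD unreachable under Pre_
  let s := PySem.Int.toStr i.2
  let filler := String.ofList (List.replicate s.toList.length '-')
  { E := t.E ++ [if "E" == string then s else filler, "-"],
    B := t.B ++ [if "B" == string then s else filler, "-"],
    G := t.G ++ [if "G" == string then s else filler, "-"],
    D := t.D ++ [if "D" == string then s else filler, "-"],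
    A := t.A ++ [if "A" == string then s else filler, "-"],
    e := t.e ++ [if "e" == string then s else filler, "-"] }

def seq_to_text (sequence : List (Int × Int)) : String :=
  let t := sequence.foldl seqStepA ⟨[], [], [], [], [], []⟩
  "e| " ++ PySem.Str.join "" t.e ++ "\n"
    ++ "B| " ++ PySem.Str.join "" t.B ++ "\n"
    ++ "G| " ++ PySem.Str.join "" t.G ++ "\n"
    ++ "D| " ++ PySem.Str.join "" t.D ++ "\n"
    ++ "A| " ++ PySem.Str.join "" t.A ++ "\n"
    ++ "E| " ++ PySem.Str.join "" t.E

-- ===== PORT B =====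
def seqLineB (events : List (String × String)) (name : String) : String :=
  name ++ "| " ++ PySem.Str.join "" (events.map (fun p =>
    if name == p.1 then p.2 ++ "-" else String.ofList (List.replicate p.2.toList.length '-') ++ "-"))

def seq_to_text_alt (sequence : List (Int × Int)) : String :=
  let events := sequence.map (fun i =>
    ((PySem.List.pyGet? ["E", "B", "G", "D", "A", "e"] (i.1 - 1)).getD "", PySem.Int.toStr i.2))
  PySem.Str.join "\n" (["e", "B", "G", "D", "A", "E"].map (seqLineB events))

-- ===== PRECONDITION & SPEC =====
-- Pre_ excludes events whose first component is outside [-5, 6]: there tuning[i[0]-1] raises IndexError (in A and in B alike).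
def Pre_seq_to_text (sequence : List (Int × Int)) : Prop :=
  ∀ p ∈ sequence, -5 ≤ p.1 ∧ p.1 ≤ 6
instance (sequence : List (Int × Int)) : Decidable (Pre_seq_to_text sequence) := by unfold Pre_seq_to_text; infer_instance
def pvWitness_seq_to_text : (List (Int × Int)) := [(1, 3), (6, 12), (0, -4)]
def Spec_seq_to_text (sequence : List (Int × Int)) (out : String) : Prop := out = seq_to_text_alt sequence
instance (sequence : List (Int × Int)) (out : String) : Decidable (Spec_seq_to_text sequence out) := by unfold Spec_seq_to_text; infer_instance

-- ===== CLAIM (what is proved, stated in full; the proofs are below) =====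
def Claim_equal_seq_to_text : Prop := ∀ (sequence : List (Int × Int)), Dom_seq_to_text sequence → Pre_seq_to_text sequence → Spec_seq_to_text sequence (seq_to_text sequence)

-- ===== LEMMAS AND PROOFS =====

-- the token A appends (without the trailing "-") for string line `name` at event i
def tokA (name : String) (i : Int × Int) : String :=
  let string := (PySem.List.pyGet? ["E", "B", "G", "D", "A", "e"] (i.1 - 1)).getD ""
  let s := PySem.Int.toStr i.2
  if name == string then s else String.ofList (List.replicate s.toList.length '-')

lemma foldA_state (seq : List (Int × Int)) (t : TabState) :
    seq.foldl seqStepA t =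
      ⟨t.E ++ seq.flatMap (fun i => [tokA "E" i, "-"]),
       t.B ++ seq.flatMap (fun i => [tokA "B" i, "-"]),
       t.G ++ seq.flatMap (fun i => [tokA "G" i, "-"]),
       t.D ++ seq.flatMap (fun i => [tokA "D" i, "-"]),
       t.A ++ seq.flatMap (fun i => [tokA "A" i, "-"]),
       t.e ++ seq.flatMap (fun i => [tokA "e" i, "-"])⟩ := by
  induction seq generalizing t with
  | nil => simp
  | cons i s ih => simp [ih, seqStepA, tokA]

lemma flatten_intersperse_nil {α : Type} : ∀ (l : List (List α)), (List.intersperse [] l).flatten = l.flatten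
  | [] => rfl
  | [a] => by simp
  | a :: b :: t => by
      rw [List.intersperse_cons₂, List.flatten_cons, List.flatten_cons,
        flatten_intersperse_nil (b :: t)]
      simp

lemma join_cons (s : String) (l : List String) :
    PySem.Str.join "" (s :: l) = s ++ PySem.Str.join "" l := by
  apply String.toList_inj.mp
  simp [PySem.Str.join, PySem.Chars.join, List.intercalate, flatten_intersperse_nil]

lemma join_flatMap_pair {α : Type} (l : List α) (f g : α → String) :
    PySem.Str.join "" (l.flatMap (fun x => [f x, g x])) =
      PySem.Str.join "" (l.map (fun x => f x ++ g x)) := by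
  induction l with
  | nil => rfl
  | cons x xs ih => simp [join_cons, ih, String.append_assoc]

lemma join_six (a b c d e f : String) :
    PySem.Str.join "\n" [a, b, c, d, e, f] =
      a ++ "\n" ++ b ++ "\n" ++ c ++ "\n" ++ d ++ "\n" ++ e ++ "\n" ++ f := by
  apply String.toList_inj.mp
  simp [PySem.Str.join, PySem.Chars.join, List.intercalate]

lemma lineA_eq (name : String) (seq : List (Int × Int)) :
    PySem.Str.join "" (seq.flatMap (fun i => [tokA name i, "-"])) =
      PySem.Str.join "" ((seq.map (fun i =>
        ((PySem.List.pyGet? ["E", "B", "G", "D", "A", "e"] (i.1 - 1)).getD "", PySem.Int.toStr i.2))).map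
        (fun p => if name == p.1 then p.2 ++ "-" else String.ofList (List.replicate p.2.toList.length '-') ++ "-")) := by
  rw [join_flatMap_pair, List.map_map]
  refine congrArg (PySem.Str.join "") (List.map_congr_left ?_)
  intro i _
  simp only [Function.comp, tokA]
  split <;> rfl

-- ===== VERDICT (by name: the statement is the Claim_ definition above) =====
theorem seq_to_text_spec : Claim_equal_seq_to_text := by
  intro seq _ _
  show seq_to_text seq = seq_to_text_alt seq
  simp only [seq_to_text, seq_to_text_alt, foldA_state, seqLineB, List.map_cons, List.map_nil,
    join_six, List.nil_append, lineA_eq]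
  apply String.toList_inj.mp
  simp
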